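-- pv_equiv track=rewrite | github.com/Herotank1234/AdventOfCode | 2019/q24.py | get_recursive_neighbours
-- ===== SOURCE A (Python) =====
-- def get_recursive_neighbours(bug):
--   (i, j, level) = bug
--   neighbours = []
--
--   # Left side
--   if j == 0:
--     neighbours.append((2, 1, level - 1))
--   elif i == 2 and j == 3:
--     for y in range(5):
--       neighbours.append((y, 4, level + 1))
--   else:
--     neighbours.append((i, j - 1, level))
--
--   # Top side
--   if i == 0:
--     neighbours.append((1, 2, level - 1))
--   elif i == 3 and j == 2:
--     for x in range(5):
--       neighbours.append((4, x, level + 1))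
--   else:
--     neighbours.append((i - 1, j, level))
--
--   # Right side
--   if j == 4:
--     neighbours.append((2, 3, level - 1))
--   elif i == 2 and j == 1:
--     for y in range(5):
--       neighbours.append((y, 0, level + 1))
--   else:
--     neighbours.append((i, j + 1, level))
--
--   # Bottom side
--   if i == 4:
--     neighbours.append((3, 2, level - 1))
--   elif i == 1 and j == 2:
--     for x in range(5):
--       neighbours.append((0, x, level + 1))
--   else:
--     neighbours.append((i + 1, j, level))
--
--   return neighbours
-- ===== SOURCE B (Python) =====
-- def get_recursive_neighbours(bug):
--   (i, j, level) = bug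
--   # Symmetry reduction: only the LEFT side's logic is written out; the other three
--   # sides are obtained by mapping the cell through a dihedral symmetry of the grid
--   # (transpose for top, horizontal flip for right, their composition for bottom),
--   # running the left-side rule there, and mapping the resulting cells back.
--   sides = [
--     (lambda p: p,                  lambda p: p),                   # left
--     (lambda p: (p[1], p[0]),       lambda p: (p[1], p[0])),        # top   = transpose
--     (lambda p: (p[0], 4 - p[1]),   lambda p: (p[0], 4 - p[1])),    # right = horizontal flip
--     (lambda p: (p[1], 4 - p[0]),   lambda p: (4 - p[1], p[0])),    # bottom = flip . transpose
--   ]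
--   neighbours = []
--   for fwd, back in sides:
--     (ti, tj) = fwd((i, j))
--     if tj == 0:
--       cells = [(2, 1, level - 1)]
--     elif (ti, tj) == (2, 3):
--       cells = [(y, 4, level + 1) for y in range(5)]
--     else:
--       cells = [(ti, tj - 1, level)]
--     for (a, b, lv) in cells:
--       neighbours.append((*back((a, b)), lv))
--   return neighbours
-- ===== Notes on version B (the rewrite author's own statement) =====
-- stated objective: alternative
-- what changed: B writes out only the left-side rule and derives the other three sides by conjugating it with dihedral symmetries of the 5x5 grid (transpose, horizontal flip, their composition), mapping the input cell in and the produced cells back, instead of A's four hand-written side blocks.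
import Mathlib
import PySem

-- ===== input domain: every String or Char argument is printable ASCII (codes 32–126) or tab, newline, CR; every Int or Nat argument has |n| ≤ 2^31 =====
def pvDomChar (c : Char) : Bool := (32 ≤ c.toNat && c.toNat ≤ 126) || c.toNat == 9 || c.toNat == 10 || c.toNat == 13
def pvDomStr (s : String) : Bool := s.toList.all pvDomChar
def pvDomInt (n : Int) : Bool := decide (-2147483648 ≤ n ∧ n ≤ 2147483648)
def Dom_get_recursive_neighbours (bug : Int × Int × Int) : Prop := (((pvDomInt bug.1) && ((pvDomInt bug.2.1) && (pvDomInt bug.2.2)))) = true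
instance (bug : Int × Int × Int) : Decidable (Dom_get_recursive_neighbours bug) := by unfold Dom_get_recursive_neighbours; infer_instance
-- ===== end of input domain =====

-- B keeps only the left-side rule and obtains the other three sides by conjugating it
-- with dihedral symmetries of the grid (objective: alternative); same list on every input.

-- ===== PORT A =====
-- literal transliteration of A: four explicit side blocks, appended in order
def get_recursive_neighbours (bug : Int × Int × Int) : List (Int × Int × Int) :=
  let (i, j, level) := bug
  let neighbours : List (Int × Int × Int) := []
  -- Left side
  let neighbours := neighbours ++
    (if j = 0 then [((2 : Int), (1 : Int), level - 1)]
     else if i = 2 ∧ j = 3 then (PySem.List.pyRange 0 5 1).map (fun y => (y, (4 : Int), level + 1))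
     else [(i, j - 1, level)])
  -- Top side
  let neighbours := neighbours ++
    (if i = 0 then [((1 : Int), (2 : Int), level - 1)]
     else if i = 3 ∧ j = 2 then (PySem.List.pyRange 0 5 1).map (fun x => ((4 : Int), x, level + 1))
     else [(i - 1, j, level)])
  -- Right side
  let neighbours := neighbours ++
    (if j = 4 then [((2 : Int), (3 : Int), level - 1)]
     else if i = 2 ∧ j = 1 then (PySem.List.pyRange 0 5 1).map (fun y => (y, (0 : Int), level + 1))
     else [(i, j + 1, level)])
  -- Bottom side
  let neighbours := neighbours ++
    (if i = 4 then [((3 : Int), (2 : Int), level - 1)]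
     else if i = 1 ∧ j = 2 then (PySem.List.pyRange 0 5 1).map (fun x => ((0 : Int), x, level + 1))
     else [(i + 1, j, level)])
  neighbours

-- ===== PORT B =====
-- Source B's left-side rule, evaluated at the symmetry-transformed coordinates
def pvLeftCells (level ti tj : Int) : List (Int × Int × Int) :=
  if tj = 0 then [((2 : Int), (1 : Int), level - 1)]
  else if ti = 2 ∧ tj = 3 then (PySem.List.pyRange 0 5 1).map (fun y => (y, (4 : Int), level + 1))
  else [(ti, tj - 1, level)]

-- Source B's table of (fwd, back) symmetry pairs
def pvSides : List ((Int × Int → Int × Int) × (Int × Int → Int × Int)) :=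
  [ (fun p => p,                fun p => p),
    (fun p => (p.2, p.1),       fun p => (p.2, p.1)),
    (fun p => (p.1, 4 - p.2),   fun p => (p.1, 4 - p.2)),
    (fun p => (p.2, 4 - p.1),   fun p => (4 - p.2, p.1)) ]

-- literal transliteration of Source B: fold over the symmetry table
def get_recursive_neighbours_alt (bug : Int × Int × Int) : List (Int × Int × Int) :=
  let (i, j, level) := bug
  pvSides.foldl (fun neighbours fb =>
    let (ti, tj) := fb.1 (i, j)
    neighbours ++ (pvLeftCells level ti tj).map (fun c =>
      ((fb.2 (c.1, c.2.1)).1, (fb.2 (c.1, c.2.1)).2, c.2.2))) []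

-- ===== PRECONDITION & SPEC =====
def Spec_get_recursive_neighbours (bug : Int × Int × Int) (out : List (Int × Int × Int)) : Prop := out = get_recursive_neighbours_alt bug
instance (bug : Int × Int × Int) (out : List (Int × Int × Int)) : Decidable (Spec_get_recursive_neighbours bug out) := by unfold Spec_get_recursive_neighbours; infer_instance

-- ===== CLAIM =====
def Claim_equal_get_recursive_neighbours : Prop := ∀ (bug : Int × Int × Int), Dom_get_recursive_neighbours bug → Spec_get_recursive_neighbours bug (get_recursive_neighbours bug)

-- ===== LEMMAS AND PROOFS =====
-- one lemma per side: B's conjugated left rule yields exactly A's block for that side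

theorem pvSide_left (i j level : Int) :
    (pvLeftCells level i j).map (fun c => (c.1, c.2.1, c.2.2)) =
      (if j = 0 then [((2 : Int), (1 : Int), level - 1)]
       else if i = 2 ∧ j = 3 then (PySem.List.pyRange 0 5 1).map (fun y => (y, (4 : Int), level + 1))
       else [(i, j - 1, level)]) := by
  unfold pvLeftCells
  split_ifs <;> simp [PySem.List.pyRange]

theorem pvSide_top (i j level : Int) :
    (pvLeftCells level j i).map (fun c => (c.2.1, c.1, c.2.2)) =
      (if i = 0 then [((1 : Int), (2 : Int), level - 1)]
       else if i = 3 ∧ j = 2 then (PySem.List.pyRange 0 5 1).map (fun x => ((4 : Int), x, level + 1))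
       else [(i - 1, j, level)]) := by
  unfold pvLeftCells
  split_ifs <;> first
    | (exfalso; omega)
    | (simp [PySem.List.pyRange]; done)
    | (simp [PySem.List.pyRange]; ring_nf; done)
    | (simp [PySem.List.pyRange]; omega)

theorem pvSide_right (i j level : Int) :
    (pvLeftCells level i (4 - j)).map (fun c => (c.1, 4 - c.2.1, c.2.2)) =
      (if j = 4 then [((2 : Int), (3 : Int), level - 1)]
       else if i = 2 ∧ j = 1 then (PySem.List.pyRange 0 5 1).map (fun y => (y, (0 : Int), level + 1))
       else [(i, j + 1, level)]) := by
  unfold pvLeftCells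
  split_ifs <;> first
    | (exfalso; omega)
    | (simp [PySem.List.pyRange]; done)
    | (simp [PySem.List.pyRange]; ring_nf; done)
    | (simp [PySem.List.pyRange]; omega)

theorem pvSide_bottom (i j level : Int) :
    (pvLeftCells level j (4 - i)).map (fun c => (4 - c.2.1, c.1, c.2.2)) =
      (if i = 4 then [((3 : Int), (2 : Int), level - 1)]
       else if i = 1 ∧ j = 2 then (PySem.List.pyRange 0 5 1).map (fun x => ((0 : Int), x, level + 1))
       else [(i + 1, j, level)]) := by
  unfold pvLeftCells
  split_ifs <;> first
    | (exfalso; omega)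
    | (simp [PySem.List.pyRange]; done)
    | (simp [PySem.List.pyRange]; ring_nf; done)
    | (simp [PySem.List.pyRange]; omega)

-- ===== VERDICT =====
theorem get_recursive_neighbours_spec : Claim_equal_get_recursive_neighbours := by
  rintro ⟨i, j, level⟩ _
  unfold Spec_get_recursive_neighbours get_recursive_neighbours get_recursive_neighbours_alt pvSides
  simp only [List.foldl, List.nil_append]
  rw [← pvSide_left i j level, ← pvSide_top i j level, ← pvSide_right i j level,
    ← pvSide_bottom i j level]
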